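-- pv_equiv track=rewrite | github.com/nicorost/PyxelSudoku2 | board.py | cols_vald
-- ===== SOURCE A (Python) =====
-- from typing import NewType, List
--
-- Board = NewType("Board", List[List[int]])
--
-- def cols_vald(board: Board) -> bool:
--     is_valid = []
--     for col in zip(*board):
--         is_valid.append(
--             len(list(filter(bool, col))) == len(set(filter(bool, col)))
--         )  # check if the column contains unique values, not counting zeroes
--     if all(is_valid):  # if all the columns are valid
--         return True
--     else:
--         return False
-- ===== SOURCE B (Python) =====
-- def cols_vald(board):
--     for col in zip(*board):
--         vals = sorted(v for v in col if v != 0)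
--         if any(a == b for a, b in zip(vals, vals[1:])):
--             return False
--     return True
-- ===== Notes on version B (the rewrite author's own statement) =====
-- stated objective: alternative
-- what changed: Per column, duplicates among non-zero entries are detected by sorting the values and scanning adjacent pairs instead of comparing the list's length with the length of a set built from it, and the function returns False at the first bad column instead of building a per-column list and applying all().
import Mathlib
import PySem

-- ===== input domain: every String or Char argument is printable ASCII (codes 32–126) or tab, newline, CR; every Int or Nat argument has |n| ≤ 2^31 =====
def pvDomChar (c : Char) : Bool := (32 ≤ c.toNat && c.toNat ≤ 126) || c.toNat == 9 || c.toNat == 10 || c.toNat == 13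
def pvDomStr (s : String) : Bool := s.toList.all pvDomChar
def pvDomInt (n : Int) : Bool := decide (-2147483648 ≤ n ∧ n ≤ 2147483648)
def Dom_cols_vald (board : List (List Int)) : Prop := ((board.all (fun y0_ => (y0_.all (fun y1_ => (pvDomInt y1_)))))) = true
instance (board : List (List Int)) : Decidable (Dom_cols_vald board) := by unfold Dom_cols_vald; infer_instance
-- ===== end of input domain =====

-- B replaces A's set-vs-list length comparison by sorting each column's non-zero values and
-- scanning adjacent pairs for an equal pair, returning False early (alternative algorithm, same cost class).

-- ===== PORT A =====
-- zip(*board): columns of the board, truncated to the shortest row (shared by both ports, as both Pythons call zip(*board))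
def pyZipStar (board : List (List Int)) : List (List Int) :=
  (List.range (((board.map List.length).min?).getD 0)).map
    (fun j => board.map (fun row => row.getD j 0))

def cols_vald (board : List (List Int)) : Bool :=
  -- is_valid list: per column, len(list(filter(bool,col))) == len(set(filter(bool,col)))
  let isValid := (pyZipStar board).map (fun col =>
    ((col.filter (fun v => v != 0)).length == (PySem.Set.ofList (col.filter (fun v => v != 0))).length))
  if isValid.all id then true else false

-- ===== PORT B =====
def cols_vald_alt (board : List (List Int)) : Bool :=
  (pyZipStar board).all (fun col =>
    let vals := PySem.List.sorted (col.filter (fun v => v != 0)) (fun x => x) false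
    !((vals.zip (PySem.List.slice vals (some 1) none)).any (fun p => p.1 == p.2)))

-- ===== PRECONDITION & SPEC =====
def Spec_cols_vald (board : List (List Int)) (out : Bool) : Prop := out = cols_vald_alt board
instance (board : List (List Int)) (out : Bool) : Decidable (Spec_cols_vald board out) := by unfold Spec_cols_vald; infer_instance

-- ===== CLAIM (what is proved, stated in full; the proofs are below) =====
def Claim_equal_cols_vald : Prop := ∀ (board : List (List Int)), Dom_cols_vald board → Spec_cols_vald board (cols_vald board)

-- ===== LEMMAS AND PROOFS =====

-- a foldl of Set.add only ever appends a sublist of the traversed list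
theorem foldl_add_sublist {α : Type} [BEq α] (xs s : List α) :
    ∃ t, List.foldl PySem.Set.add s xs = s ++ t ∧ t.Sublist xs := by
  induction xs generalizing s with
  | nil => exact ⟨[], by simp⟩
  | cons x xs ih =>
    simp only [List.foldl_cons]
    by_cases h : s.contains x = true
    · have hax : PySem.Set.add s x = s := by simp [PySem.Set.add, h]
      rw [hax]
      obtain ⟨t, ht, hs⟩ := ih s
      exact ⟨t, ht, hs.cons x⟩
    · have hax : PySem.Set.add s x = s ++ [x] := by simp [PySem.Set.add, h]
      rw [hax]
      obtain ⟨t, ht, hs⟩ := ih (s ++ [x])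
      exact ⟨x :: t, by simpa using ht, hs.cons₂ x⟩

theorem ofList_sublist {α : Type} [BEq α] (xs : List α) :
    (PySem.Set.ofList xs).Sublist xs := by
  obtain ⟨t, ht, hs⟩ := foldl_add_sublist xs []
  rw [PySem.Set.ofList_eq_foldl, ht]
  simpa using hs

theorem length_eq_ofList_iff_nodup (xs : List Int) :
    xs.length = (PySem.Set.ofList xs).length ↔ xs.Nodup := by
  constructor
  · intro h
    have heq := List.Sublist.eq_of_length (ofList_sublist xs) h.symm
    rw [← heq]
    exact PySem.Set.nodup_ofList xs
  · intro h
    have hperm : (PySem.Set.ofList xs).Perm xs :=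
      (List.perm_ext_iff_of_nodup (PySem.Set.nodup_ofList xs) h).mpr
        (fun x => by simp [PySem.Set.mem_ofList])
    exact hperm.length_eq.symm

-- on a ≤-sorted list, the adjacent-pair scan finds no equal pair iff the list has no duplicates
theorem anyAdj_sorted (ys : List Int) (hp : ys.Pairwise (· ≤ ·)) :
    ((ys.zip ys.tail).any (fun p => p.1 == p.2)) = false ↔ ys.Nodup := by
  induction ys with
  | nil => simp
  | cons a t ih =>
    cases t with
    | nil => simp
    | cons b u =>
      rw [List.pairwise_cons] at hp
      obtain ⟨ha, hp2⟩ := hp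
      simp only [List.tail_cons] at ih
      simp only [List.tail_cons, List.zip_cons_cons, List.any_cons, Bool.or_eq_false_iff,
        beq_eq_false_iff_ne]
      rw [ih hp2]
      constructor
      · rintro ⟨hne, hnd⟩
        rw [List.nodup_cons]
        refine ⟨?_, hnd⟩
        intro hmem
        rcases List.mem_cons.mp hmem with h | hm
        · exact hne h
        · have hab : a < b := lt_of_le_of_ne (ha b (by simp)) hne
          have hba : b ≤ a := (List.pairwise_cons.mp hp2).1 a hm
          omega
      · intro hnd
        rw [List.nodup_cons] at hnd
        obtain ⟨hnm, hnd2⟩ := hnd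
        exact ⟨fun h => hnm (by simp [h]), hnd2⟩

theorem column_eq (xs : List Int) :
    ((xs.length == (PySem.Set.ofList xs).length) : Bool) =
    (let vals := PySem.List.sorted xs (fun x => x) false
     !((vals.zip (PySem.List.slice vals (some 1) none)).any (fun p => p.1 == p.2))) := by
  rw [Bool.eq_iff_iff]
  simp only [PySem.List.slice_from_one, beq_iff_eq, Bool.not_eq_true']
  rw [anyAdj_sorted _ (by simpa using PySem.List.sorted_pairwise xs (fun x => x)),
    (PySem.List.sorted_perm xs (fun x => x) false).nodup_iff,
    length_eq_ofList_iff_nodup]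

theorem all_congr' {α : Type} (l : List α) (f g : α → Bool) (h : ∀ x ∈ l, f x = g x) :
    l.all f = l.all g := by
  induction l with
  | nil => rfl
  | cons a t ih =>
    simp only [List.all_cons, h a (by simp), ih (fun x hx => h x (by simp [hx]))]

-- ===== VERDICT (by name: the statement is the Claim_ definition above) =====
theorem cols_vald_spec : Claim_equal_cols_vald := by
  intro board _
  unfold Spec_cols_vald cols_vald cols_vald_alt
  simp only [List.all_map, Function.comp_def, id]
  rw [all_congr' (pyZipStar board) _ _ (fun col _ => column_eq (col.filter (fun v => v != 0)))]
  cases (pyZipStar board).all _ <;> simp
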